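-- pv_equiv track=rewrite | github.com/ali-john/Leetcode-solutions | my-folder/3812-smallest-palindromic-rearrangement-i/solution.py | smallestPalindrome
-- ===== SOURCE A (Python) =====
-- def smallestPalindrome(s: str) -> str:
--     n = len(s)
--     forward = []
--     for i in range(n//2):
--         forward.append(s[i])
--
--     forward = "".join(sorted(forward))
--     backward = forward[::-1]
--     if n%2 != 0: # odd string
--         forward+=s[n//2]
--     return forward + backward
-- ===== SOURCE B (Python) =====
-- def smallestPalindrome(s: str) -> str:
--     # Two-pointer mirrored fill: count the characters of the first half, then walk the
--     # alphabet in increasing order and write each occurrence simultaneously to the two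
--     # outermost unfilled mirror positions of an in-place output buffer.  No comparison
--     # sort of the half, no reversal, no concatenation of half + middle + mirror: the
--     # middle character (odd length) is already in place because the buffer starts as
--     # list(s).
--     n = len(s)
--     res = list(s)
--     counts = {}
--     for i in range(n // 2):
--         counts[s[i]] = counts.get(s[i], 0) + 1
--     L, R = 0, n - 1
--     for c in sorted(counts):
--         for _ in range(counts[c]):
--             res[L] = c
--             res[R] = c
--             L += 1
--             R -= 1
--     return "".join(res)
-- ===== Notes on version B (the rewrite author's own statement) =====
-- stated objective: alternative
-- what changed: B never builds or sorts the half-string and never reverses/concatenates: it counts the first-half characters, then fills a single in-place buffer (initialised to list(s), so the odd middle char is already in place) with a two-pointer sweep that writes each character to both mirror positions at once, walking the distinct characters in increasing order.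
import Mathlib
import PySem

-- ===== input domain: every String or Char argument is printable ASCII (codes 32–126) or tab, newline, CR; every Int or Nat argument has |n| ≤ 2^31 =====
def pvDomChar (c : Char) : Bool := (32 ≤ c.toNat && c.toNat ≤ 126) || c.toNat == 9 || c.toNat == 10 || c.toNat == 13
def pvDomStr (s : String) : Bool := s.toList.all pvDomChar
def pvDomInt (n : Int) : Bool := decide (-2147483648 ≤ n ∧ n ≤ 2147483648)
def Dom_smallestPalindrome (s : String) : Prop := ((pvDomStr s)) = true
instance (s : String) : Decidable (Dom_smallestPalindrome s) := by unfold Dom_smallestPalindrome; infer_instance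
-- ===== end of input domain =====

-- B replaces A's sort-the-half-then-mirror construction by a two-pointer mirrored
-- in-place fill driven by character counts (alternative algorithm, same cost class).

-- ===== PORT A =====
def smallestPalindrome (s : String) : String :=
  let cs := s.toList
  let n := cs.length
  -- for i in range(n//2): forward.append(s[i])   (s[i] via pyGet?; i is always in range here)
  let forward := (PySem.List.pyRange 0 ((n / 2 : Nat) : Int)).foldl
      (fun acc i => acc ++ (PySem.List.pyGet? cs i).toList) []
  let forward := PySem.List.sorted forward (fun x => x) false   -- "".join(sorted(forward))
  let backward := forward.reverse                                -- forward[::-1]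
  let forward := if n % 2 ≠ 0 then forward ++ (PySem.List.pyGet? cs ((n / 2 : Nat) : Int)).toList
                 else forward                                    -- forward += s[n//2]
  String.mk (forward ++ backward)

-- ===== PORT B =====
-- res[i] = c for an Int index: exact where the index is in range (always the case in
-- smallestPalindrome_alt); where Python would raise IndexError this returns res unchanged.
def pySetChar (xs : List Char) (i : Int) (c : Char) : List Char :=
  match PySem.List.pyIdx? xs.length i with
  | some j => xs.set j c
  | none => xs

def smallestPalindrome_alt (s : String) : String :=
  let cs := s.toList
  let n := cs.length
  let res := cs                                                  -- res = list(s)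
  -- for i in range(n//2): counts[s[i]] = counts.get(s[i], 0) + 1   (s[i] always in range)
  let counts := (PySem.List.pyRange 0 ((n / 2 : Nat) : Int)).foldl
      (fun d i => match PySem.List.pyGet? cs i with
        | some c => d.insert c (d.getD c 0 + 1)
        | none => d) (PySem.Dict.empty : PySem.Dict Char Int)
  -- L, R = 0, n - 1; for c in sorted(counts): for _ in range(counts[c]): res[L]=c; res[R]=c; L+=1; R-=1
  let st := (PySem.List.sorted counts.keys (fun x => x) false).foldl
      (fun st c => (PySem.List.pyRange 0 (counts.getD c 0)).foldl
          (fun (st : List Char × Int × Int) _ =>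
            (pySetChar (pySetChar st.1 st.2.1 c) st.2.2 c, st.2.1 + 1, st.2.2 - 1)) st)
      (res, (0 : Int), (n : Int) - 1)
  String.mk st.1                                                 -- "".join(res)

-- ===== PRECONDITION & SPEC =====
def Spec_smallestPalindrome (s : String) (out : String) : Prop := out = smallestPalindrome_alt s
instance (s : String) (out : String) : Decidable (Spec_smallestPalindrome s out) := by unfold Spec_smallestPalindrome; infer_instance

-- ===== CLAIM (what is proved, stated in full; the proofs are below) =====
def Claim_equal_smallestPalindrome : Prop := ∀ (s : String), Dom_smallestPalindrome s → Spec_smallestPalindrome s (smallestPalindrome s)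

-- ===== LEMMAS AND PROOFS =====

-- A's index loop collects exactly the first k characters.
theorem foldA_take (cs : List Char) (k : Nat) (hk : k ≤ cs.length) :
    (PySem.List.pyRange 0 ((k : Nat) : Int)).foldl
      (fun acc i => acc ++ (PySem.List.pyGet? cs i).toList) [] = cs.take k := by
  induction k with
  | zero => simp
  | succ k ih =>
    have h1 : ((k + 1 : Nat) : Int) = (k : Int) + 1 := by push_cast; ring
    rw [h1, PySem.List.pyRange_one_succ_right (by positivity), List.foldl_append,
        ih (by omega)]
    simp only [List.foldl_cons, List.foldl_nil, PySem.List.pyGet?_natCast]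
    rw [List.take_add_one]

-- B's counting loop over indices is the counter of the first k characters.
theorem foldB_counter (cs : List Char) (k : Nat) (hk : k ≤ cs.length) :
    (PySem.List.pyRange 0 ((k : Nat) : Int)).foldl
      (fun d i => match PySem.List.pyGet? cs i with
        | some c => d.insert c (d.getD c 0 + 1)
        | none => d) (PySem.Dict.empty : PySem.Dict Char Int)
      = PySem.Dict.counter (cs.take k) := by
  induction k with
  | zero => simp [PySem.Dict.counter]
  | succ k ih =>
    have h1 : ((k + 1 : Nat) : Int) = (k : Int) + 1 := by push_cast; ring
    have hk' : k < cs.length := by omega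
    rw [h1, PySem.List.pyRange_one_succ_right (by positivity), List.foldl_append,
        ih (by omega)]
    simp only [List.foldl_cons, List.foldl_nil, PySem.List.pyGet?_natCast,
      List.getElem?_eq_getElem hk']
    rw [← PySem.Dict.foldl_insert_getD_add_one_eq_counter,
        ← PySem.Dict.foldl_insert_getD_add_one_eq_counter,
        show List.take (k + 1) cs = List.take k cs ++ [cs[k]] from by
          rw [List.take_add_one, List.getElem?_eq_getElem hk']; rfl,
        List.foldl_append]
    rfl

-- a 'for _ in range(m)' loop repeating the same step is a fold over replicate.
theorem foldl_pyRange_const {σ : Type} (f : σ → Char → σ) (c : Char) (m : Nat) (st : σ) :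
    (PySem.List.pyRange 0 ((m : Nat) : Int)).foldl (fun st _ => f st c) st
      = (List.replicate m c).foldl f st := by
  induction m generalizing st with
  | zero => simp
  | succ m ih =>
    have h1 : ((m + 1 : Nat) : Int) = (m : Int) + 1 := by push_cast; ring
    rw [h1, PySem.List.pyRange_one_succ_right (by positivity), List.foldl_append, ih,
        List.replicate_succ', List.foldl_append]
    simp

-- Occurrences of a character in the concatenated blocks over a duplicate-free char list.
theorem count_blocks (t : List Char) (ds : List Char) (hnd : ds.Nodup) (a : Char) :
    (ds.flatMap (fun c => List.replicate (t.count c) c)).count a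
      = if a ∈ ds then t.count a else 0 := by
  induction ds with
  | nil => simp
  | cons c ds ih =>
    rw [List.flatMap_cons, List.count_append, ih hnd.of_cons, List.count_replicate]
    by_cases hac : c = a
    · subst hac
      have hnotin : c ∉ ds := (List.nodup_cons.mp hnd).1
      simp [hnotin]
    · have : (c == a) = false := beq_eq_false_iff_ne.mpr hac
      simp [this, Ne.symm hac]

-- The concatenated blocks over a strictly increasing char list are sorted.
theorem pairwise_blocks (t : List Char) (ds : List Char) (hp : ds.Pairwise (· < ·)) :
    (ds.flatMap (fun c => List.replicate (t.count c) c)).Pairwise (· ≤ ·) := by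
  induction ds with
  | nil => simp
  | cons c ds ih =>
    rw [List.flatMap_cons, List.pairwise_append]
    refine ⟨List.pairwise_replicate.mpr (Or.inr le_rfl), ih (List.Pairwise.of_cons hp), ?_⟩
    intro x hx y hy
    have hxe : x = c := List.eq_of_mem_replicate hx
    obtain ⟨d, hd, hyd⟩ := List.mem_flatMap.mp hy
    have hye : y = d := List.eq_of_mem_replicate hyd
    subst hxe hye
    exact le_of_lt ((List.pairwise_cons.mp hp).1 y hd)

-- One block per distinct character, in increasing order, concatenates to the sorted list.
theorem blocks_eq_sorted (t : List Char) :
    (PySem.List.sorted (PySem.Set.ofList t) (fun x => x) false).flatMap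
        (fun c => List.replicate (t.count c) c)
      = PySem.List.sorted t (fun x => x) false := by
  have hperm : (PySem.List.sorted (PySem.Set.ofList t) (fun x => x) false).Perm
      (PySem.Set.ofList t) := PySem.List.sorted_perm _ _ _
  have hnd : (PySem.List.sorted (PySem.Set.ofList t) (fun x => x) false).Nodup :=
    hperm.symm.nodup (PySem.Set.nodup_ofList t)
  refine (PySem.List.sorted_id_eq_of_perm_of_pairwise t _ ?_
    (pairwise_blocks t _ (PySem.List.sorted_ofList_pairwise_lt t))).symm
  refine List.perm_iff_count.mpr (fun a => ?_)
  rw [count_blocks t _ hnd a]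
  by_cases ha : a ∈ t
  · have : a ∈ PySem.List.sorted (PySem.Set.ofList t) (fun x => x) false := by
      rw [PySem.List.mem_sorted, PySem.Set.mem_ofList]; exact ha
    simp [this]
  · have : a ∉ PySem.List.sorted (PySem.Set.ofList t) (fun x => x) false := by
      rw [PySem.List.mem_sorted, PySem.Set.mem_ofList]; exact ha
    simp [this, List.count_eq_zero.mpr ha]

-- The mirrored two-pointer fill, characterised: writing the chars of h outward-in from
-- position l (and its mirror) overwrites exactly the two framed segments.
theorem pySetChar_natCast (xs : List Char) (j : Nat) (c : Char) (h : j < xs.length) :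
    pySetChar xs (j : Int) c = xs.set j c := by
  simp [pySetChar, PySem.List.pyIdx?, h]

theorem fill_spec (h : List Char) (res : List Char) (l : Nat)
    (hlen : 2 * l + 2 * h.length ≤ res.length) :
    h.foldl (fun st c =>
        (pySetChar (pySetChar st.1 st.2.1 c) st.2.2 c, st.2.1 + 1, st.2.2 - 1))
      (res, (l : Int), ((res.length : Int) - 1 - l))
    = (res.take l ++ h
        ++ (res.drop (l + h.length)).take (res.length - (2 * l + 2 * h.length))
        ++ h.reverse ++ res.drop (res.length - l),
       ((l : Int) + h.length), ((res.length : Int) - 1 - l - h.length)) := by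
  induction h generalizing res l with
  | nil =>
    have h2l : 2 * l ≤ res.length := by simpa using hlen
    have h1 : l + (res.length - (2 * l)) = res.length - l := by omega
    simp only [List.foldl_nil, List.length_nil, Nat.mul_zero, Nat.add_zero,
      List.reverse_nil, List.append_nil, Nat.cast_zero,
      Int.add_zero, Int.sub_zero]
    refine Prod.ext ?_ rfl
    dsimp only
    rw [← List.take_add, h1, List.take_append_drop]
  | cons c tl ih =>
    have hlen' : 2 * l + 2 * (tl.length + 1) ≤ res.length := by
      simpa [List.length_cons] using hlen
    have hln : l < res.length := by omega
    have hbn : res.length - 1 - l < res.length := by omega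
    have hlb : l < res.length - 1 - l := by omega
    rw [List.foldl_cons]
    dsimp only
    rw [pySetChar_natCast _ _ _ hln]
    have hcast : ((res.length : Int) - 1 - l) = ((res.length - 1 - l : Nat) : Int) := by
      omega
    rw [hcast, pySetChar_natCast _ _ _ (by simpa using hbn)]
    set b := res.length - 1 - l with hb
    set res' := (res.set l c).set b c with hres'
    have hres'len : res'.length = res.length := by simp [hres']
    have e2 : ((l : Int) + 1) = ((l + 1 : Nat) : Int) := by push_cast; ring
    have e3 : ((res.length - 1 - l : Nat) : Int) - 1 = ((res'.length : Int) - 1 - (l + 1 : Nat)) := by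
      rw [hres'len]; push_cast; omega
    rw [e2, e3, ih res' (l + 1) (by rw [hres'len]; omega)]
    have hP1 : List.take (l + 1) res' = List.take l res ++ [c] := by
      rw [hres', List.take_set, List.set_eq_of_length_le (by simp; omega),
          List.take_set, List.take_add_one, List.getElem?_eq_getElem hln,
          Option.toList_some, List.set_append]
      have hl : (List.take l res).length = l := by simp; omega
      rw [if_neg (by omega), hl]
      simp
    have hP2 : List.take (res.length - (2 * l + 2 * (tl.length + 1)))
        (List.drop (l + 1 + tl.length) res')
        = List.take (res.length - (2 * l + 2 * (tl.length + 1)))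
          (List.drop (l + 1 + tl.length) res) := by
      rw [hres', List.drop_set, if_neg (by omega), List.drop_set, if_pos (by omega),
          List.take_set, List.set_eq_of_length_le (by simp; omega)]
    have hP3 : List.drop (res.length - (l + 1)) res' = c :: List.drop (res.length - l) res := by
      have hbb : res.length - (l + 1) = b := by omega
      have hb1 : b + 1 = res.length - l := by omega
      rw [hres', hbb, List.drop_set, if_neg (by omega), Nat.sub_self,
          List.drop_set, if_pos (by omega), List.drop_eq_getElem_cons hbn, hb1]
      rfl
    refine Prod.ext ?_ (Prod.ext ?_ ?_)
    · dsimp only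
      rw [hres'len]
      rw [show res.length - (2 * (l + 1) + 2 * tl.length)
            = res.length - (2 * l + 2 * (tl.length + 1)) from by omega]
      rw [hP1, hP2, hP3]
      simp [show l + 1 + tl.length = l + (tl.length + 1) from by omega]
    · dsimp only
      simp only [List.length_cons]
      push_cast
      omega
    · dsimp only
      simp only [List.length_cons, hres'len]
      push_cast
      omega

-- the outer loop over sorted distinct characters with counted repetitions is the
-- same fold taken over the sorted first half itself.
theorem outer_eq (t : List Char) (st0 : List Char × Int × Int) :
    (PySem.List.sorted (PySem.Set.ofList t) (fun x => x) false).foldl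
      (fun st c => (PySem.List.pyRange 0 ((PySem.Dict.counter t).getD c 0)).foldl
          (fun (st : List Char × Int × Int) _ =>
            (pySetChar (pySetChar st.1 st.2.1 c) st.2.2 c, st.2.1 + 1, st.2.2 - 1)) st) st0
    = (PySem.List.sorted t (fun x => x) false).foldl
        (fun st c => (pySetChar (pySetChar st.1 st.2.1 c) st.2.2 c, st.2.1 + 1, st.2.2 - 1)) st0 := by
  rw [← blocks_eq_sorted t, List.foldl_flatMap]
  apply PySem.List.foldl_congr_mem
  intro acc c _
  rw [PySem.Dict.getD_counter]
  exact foldl_pyRange_const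
    (fun st c => (pySetChar (pySetChar st.1 st.2.1 c) st.2.2 c, st.2.1 + 1, st.2.2 - 1))
    c (List.count c t) acc

-- ===== VERDICT (by name: the statement is the Claim_ definition above) =====
theorem smallestPalindrome_spec : Claim_equal_smallestPalindrome := by
  intro s _
  unfold Spec_smallestPalindrome smallestPalindrome smallestPalindrome_alt
  dsimp only
  rw [foldA_take s.toList (s.toList.length / 2) (Nat.div_le_self _ _),
      foldB_counter s.toList (s.toList.length / 2) (Nat.div_le_self _ _),
      PySem.Dict.keys_counter]
  set cs := s.toList with hcs
  set n := cs.length with hn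
  set t := cs.take (n / 2) with ht
  have hinit : ((0 : Int), (n : Int) - 1) = (((0 : Nat) : Int), ((cs.length : Int) - 1 - (0 : Nat))) := by
    rw [hn]; norm_num
  rw [hinit, outer_eq t, fill_spec _ cs 0 ?hlen]
  case hlen =>
    have h1 := ((PySem.List.sorted_perm t (fun x => x) false).length_eq)
    have htl : t.length = n / 2 := by
      rw [ht, List.length_take]; omega
    have hn' : n = cs.length := hn
    omega
  have hlh : (PySem.List.sorted t (fun x => x) false).length = n / 2 := by
    rw [(PySem.List.sorted_perm t (fun x => x) false).length_eq, ht, List.length_take]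
    omega
  dsimp only
  congr 1
  rw [hlh]
  by_cases hodd : n % 2 = 0
  · have h1 : n - (2 * 0 + 2 * (n / 2)) = 0 := by omega
    simp [hodd]
    omega
  · have h1 : n - (2 * 0 + 2 * (n / 2)) = 1 := by omega
    have h2 : n / 2 < n := by omega
    rw [h1]
    have h3 : List.take 1 (List.drop (0 + n / 2) cs) = [cs[n / 2]] := by
      rw [Nat.zero_add, List.drop_eq_getElem_cons h2]
      rfl
    rw [h3]
    simp only [PySem.List.pyGet?_natCast,
      List.getElem?_eq_getElem h2, Option.toList_some]
    rw [if_pos (by omega)]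
    simp
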